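-- pv_equiv track=rewrite | github.com/RyanBuss01/patent_person_enrichment | runners/csv_builder.py | _format_address
-- ===== SOURCE A (Python) =====
-- def _sanitize_for_csv(val):
--     """Sanitize values for CSV output"""
--     if val is None:
--         return ''
--     if isinstance(val, bool):
--         return ''
--     s = str(val).strip()
--     return '' if s.lower() in {'nan', 'null', 'none', 'true', 'false'} else s
--
-- def _format_address(street: str = '', locality: str = '', region: str = '', postal: str = '', country: str = '') -> str:
--     parts = []
--     street_clean = _sanitize_for_csv(street)
--     if street_clean:
--         parts.append(street_clean)
--
--     locality_clean = _sanitize_for_csv(locality)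
--     region_clean = _sanitize_for_csv(region)
--     locality_parts = [p for p in [locality_clean, region_clean] if p]
--     if locality_parts:
--         parts.append(', '.join(locality_parts))
--
--     postal_clean = _sanitize_for_csv(postal)
--     if postal_clean:
--         parts.append(postal_clean)
--
--     country_clean = _sanitize_for_csv(country)
--     if country_clean and country_clean.lower() not in {'us', 'usa', 'united states'}:
--         parts.append(country_clean)
--
--     return ', '.join(parts)
-- ===== SOURCE B (Python) =====
-- def _sanitize_for_csv(val):
--     """Sanitize values for CSV output"""
--     if val is None:
--         return ''
--     if isinstance(val, bool):
--         return ''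
--     s = str(val).strip()
--     return '' if s.lower() in {'nan', 'null', 'none', 'true', 'false'} else s
--
-- def _format_address(street: str = '', locality: str = '', region: str = '', postal: str = '', country: str = '') -> str:
--     # Build the address string back-to-front: start from the (US-filtered)
--     # country, then prepend each earlier field to the accumulated string,
--     # inserting the comma-space separator only when something already follows.  No parts list,
--     # no join: the separator structure emerges from the prepend step itself.
--     c = _sanitize_for_csv(country)
--     acc = '' if c.lower() in {'us', 'usa', 'united states'} else c
--     for raw in (postal, region, locality, street):
--         s = _sanitize_for_csv(raw)
--         if s:
--             acc = s if not acc else s + ', ' + acc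
--     return acc
-- ===== Notes on version B (the rewrite author's own statement) =====
-- stated objective: alternative
-- what changed: Replaces A's forward construction of a parts list (with a nested sub-join of locality and region, then one outer join) by a back-to-front fold that starts from the US-filtered country and prepends each earlier sanitized field to a string accumulator, inserting the comma-space separator only when something already follows; no parts list or join remains.
import Mathlib
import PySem

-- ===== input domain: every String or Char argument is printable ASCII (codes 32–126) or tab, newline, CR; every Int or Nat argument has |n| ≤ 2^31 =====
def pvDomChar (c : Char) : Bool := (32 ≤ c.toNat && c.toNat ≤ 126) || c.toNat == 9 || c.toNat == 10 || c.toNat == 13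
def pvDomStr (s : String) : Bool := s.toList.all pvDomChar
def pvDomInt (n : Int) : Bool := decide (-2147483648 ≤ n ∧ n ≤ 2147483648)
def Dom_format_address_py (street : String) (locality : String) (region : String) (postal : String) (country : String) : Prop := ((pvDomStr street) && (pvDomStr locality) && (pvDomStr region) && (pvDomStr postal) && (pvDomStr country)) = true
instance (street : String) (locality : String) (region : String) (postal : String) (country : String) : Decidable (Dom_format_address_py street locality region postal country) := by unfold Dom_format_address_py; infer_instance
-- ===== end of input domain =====

-- B builds the result back-to-front with a string accumulator (prepending each field,
-- adding the comma-space separator only when something follows), replacing A's parts list with nested sub-join;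
-- objective: alternative decomposition, same cost.

-- _sanitize_for_csv (shared helper of A and B; arguments are str, so the
-- None/bool branches never fire and str(val) = val)
def pvSanitize (val : String) : String :=
  let s := PySem.Str.strip val
  if PySem.Str.lower s ∈ (["nan", "null", "none", "true", "false"] : List String) then "" else s

-- ===== PORT A =====
def format_address_py (street : String) (locality : String) (region : String) (postal : String) (country : String) : String :=
  let parts : List String := []
  let street_clean := pvSanitize street
  let parts := if street_clean ≠ "" then parts ++ [street_clean] else parts
  let locality_clean := pvSanitize locality
  let region_clean := pvSanitize region
  let locality_parts := [locality_clean, region_clean].filter (fun p => p ≠ "")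
  let parts := if locality_parts ≠ [] then parts ++ [PySem.Str.join ", " locality_parts] else parts
  let postal_clean := pvSanitize postal
  let parts := if postal_clean ≠ "" then parts ++ [postal_clean] else parts
  let country_clean := pvSanitize country
  let parts := if country_clean ≠ "" ∧ PySem.Str.lower country_clean ∉ (["us", "usa", "united states"] : List String) then parts ++ [country_clean] else parts
  PySem.Str.join ", " parts

-- ===== PORT B =====
-- one step of B's loop: prepend a sanitized field to the accumulated tail
def pvPrependStep (acc : String) (raw : String) : String :=
  let s := pvSanitize raw
  if s = "" then acc else if acc = "" then s else s ++ ", " ++ acc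

def format_address_py_alt (street : String) (locality : String) (region : String) (postal : String) (country : String) : String :=
  let c := pvSanitize country
  let acc := if PySem.Str.lower c ∈ (["us", "usa", "united states"] : List String) then "" else c
  [postal, region, locality, street].foldl pvPrependStep acc

-- ===== PRECONDITION & SPEC =====
def Spec_format_address_py (street : String) (locality : String) (region : String) (postal : String) (country : String) (out : String) : Prop := out = format_address_py_alt street locality region postal country
instance (street : String) (locality : String) (region : String) (postal : String) (country : String) (out : String) : Decidable (Spec_format_address_py street locality region postal country out) := by unfold Spec_format_address_py; infer_instance

-- ===== CLAIM =====
def Claim_equal_format_address_py : Prop := ∀ (street : String) (locality : String) (region : String) (postal : String) (country : String), Dom_format_address_py street locality region postal country → Spec_format_address_py street locality region postal country (format_address_py street locality region postal country)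

-- ===== LEMMAS AND PROOFS =====

-- Proof: unfold both ports, abstract the five sanitized field values, then an
-- exhaustive case split on emptiness and the country filter reduces both sides
-- to the same concrete string concatenation (via String extensionality).

-- ===== VERDICT =====
set_option maxHeartbeats 1000000 in
theorem format_address_py_spec : Claim_equal_format_address_py := by
  intro street locality region postal country _
  unfold Spec_format_address_py
  simp only [format_address_py, format_address_py_alt, pvPrependStep, List.foldl]
  generalize pvSanitize street = a
  generalize pvSanitize locality = b
  generalize pvSanitize region = c
  generalize pvSanitize postal = d
  generalize pvSanitize country = e
  by_cases ha : a = "" <;> by_cases hb : b = "" <;> by_cases hc : c = "" <;>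
    by_cases hd : d = "" <;> by_cases he : e = "" <;>
    by_cases hm : PySem.Str.lower e ∈ (["us", "usa", "united states"] : List String) <;>
    simp [ha, hb, hc, hd, he, hm, List.filter,
      PySem.Str.join, PySem.Chars.join, List.intercalate, List.intersperse,
      String.ext_iff]
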